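-- pv_equiv track=rewrite | github.com/Luxisoft/navai-exhibition | scripts/regenerate_localized_markdown.py | split_masked
-- ===== SOURCE A (Python) =====
-- def split_masked(masked: str, max_len: int = 4200) -> list[str]:
--     if len(masked) <= max_len:
--         return [masked]
--
--     pieces: list[str] = []
--     start = 0
--     while start < len(masked):
--         end = min(start + max_len, len(masked))
--         if end < len(masked):
--             cut = masked.rfind("\n\n", start, end)
--             if cut == -1:
--                 cut = masked.rfind("\n", start, end)
--             if cut != -1 and cut > start + 800:
--                 end = cut
--         pieces.append(masked[start:end])
--         start = end
--     return pieces
-- ===== SOURCE B (Python) =====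
-- def _bisect_right(idx, x):
--     lo, hi = 0, len(idx)
--     while lo < hi:
--         mid = (lo + hi) // 2
--         if x < idx[mid]:
--             hi = mid
--         else:
--             lo = mid + 1
--     return lo
--
--
-- def _best_at_most(idx, lo, hi):
--     # largest element of the sorted list idx lying in [lo, hi], else -1
--     j = _bisect_right(idx, hi)
--     if j > 0 and idx[j - 1] >= lo:
--         return idx[j - 1]
--     return -1
--
--
-- def split_masked(masked: str, max_len: int = 4200) -> list[str]:
--     n = len(masked)
--     if n <= max_len:
--         return [masked]
--     doubles = [i for i in range(n - 1) if masked[i] == "\n" and masked[i + 1] == "\n"]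
--     singles = [i for i in range(n) if masked[i] == "\n"]
--     spans = []
--     start = 0
--     while start < n:
--         end = min(start + max_len, n)
--         if end < n:
--             cut = _best_at_most(doubles, start, end - 2)
--             if cut == -1:
--                 cut = _best_at_most(singles, start, end - 1)
--             if cut != -1 and cut > start + 800:
--                 end = cut
--         spans.append((start, end))
--         start = end
--     return [masked[a:b] for a, b in spans]
-- ===== Notes on version B (the rewrite author's own statement) =====
-- stated objective: alternative
-- what changed: Replaces the per-chunk backward rfind scans with one forward pass that pre-builds sorted lists of all double- and single-newline positions, which the greedy loop then queries by binary search, and emits pieces by slicing a span list at the end.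
import Mathlib
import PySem

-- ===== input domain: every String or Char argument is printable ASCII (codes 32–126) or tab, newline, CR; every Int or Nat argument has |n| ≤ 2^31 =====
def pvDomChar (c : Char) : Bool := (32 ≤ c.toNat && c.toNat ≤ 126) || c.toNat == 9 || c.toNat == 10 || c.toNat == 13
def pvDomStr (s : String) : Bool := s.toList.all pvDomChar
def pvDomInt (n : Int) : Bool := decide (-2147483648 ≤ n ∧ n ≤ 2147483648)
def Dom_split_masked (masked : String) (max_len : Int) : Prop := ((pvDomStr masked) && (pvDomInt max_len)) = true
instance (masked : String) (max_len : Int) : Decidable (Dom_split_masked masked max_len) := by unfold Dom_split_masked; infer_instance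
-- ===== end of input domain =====

-- B replaces A's per-chunk backward rfind scans by binary search in precomputed sorted lists of
-- newline positions and emits the pieces by slicing a span list (alternative algorithm, same value).

-- ===== PORT A =====
-- the end-of-chunk computation of one iteration of A's while loop body
def chunkEndA (cs : List Char) (n max_len start : Int) : Int :=
  let e0 := min (start + max_len) n
  if e0 < n then
    let cut0 := PySem.Chars.rfindFrom cs ['\n', '\n'] start (some e0)
    let cut := if cut0 = -1 then PySem.Chars.rfindFrom cs ['\n'] start (some e0) else cut0
    if cut ≠ -1 ∧ start + 800 < cut then cut else e0
  else e0

-- A's while loop, fuel = one unit per iteration (under Pre_ the loop advances start by at least one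
-- each iteration, so fuel length+1 is never exhausted)
def splitLoopA (masked : String) (cs : List Char) (n max_len : Int)
    (pieces : List String) (start : Int) : Nat → List String
  | 0 => pieces
  | fuel + 1 =>
    if start < n then
      let e := chunkEndA cs n max_len start
      splitLoopA masked cs n max_len
        (pieces ++ [PySem.Str.slice masked (some start) (some e)]) e fuel
    else pieces

def split_masked (masked : String) (max_len : Int) : List String :=
  if (masked.toList.length : Int) ≤ max_len then [masked]
  else splitLoopA masked masked.toList (masked.toList.length : Int) max_len [] 0
    (masked.toList.length + 1)

-- ===== PORT B =====
-- _bisect_right in Source B is the standard lo/hi binary-search loop; PySem.List.bisectRight is defined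
-- as exactly that loop.
-- _best_at_most: largest element of the sorted list idx lying in [lo, hi], else -1
def bestAtMost (idx : List Int) (lo hi : Int) : Int :=
  let j := PySem.List.bisectRight idx hi
  if 0 < j then
    -- idx[j - 1]: always in range here, 0 < j ≤ idx.length
    if lo ≤ idx.getD (j - 1) (-1) then idx.getD (j - 1) (-1) else -1
  else -1

-- the two comprehensions of Source B: positions of "\n\n" and of "\n"
def doublesOf (cs : List Char) : List Int :=
  ((List.range (cs.length - 1)).filter
    (fun i => cs[i]? == some '\n' && cs[i + 1]? == some '\n')).map (fun (i : Nat) => (i : Int))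

def singlesOf (cs : List Char) : List Int :=
  ((List.range cs.length).filter (fun i => cs[i]? == some '\n')).map (fun (i : Nat) => (i : Int))

-- the end-of-chunk computation of one iteration of B's while loop body
def chunkEndB (n max_len : Int) (doubles singles : List Int) (start : Int) : Int :=
  let e0 := min (start + max_len) n
  if e0 < n then
    let cut0 := bestAtMost doubles start (e0 - 2)
    let cut := if cut0 = -1 then bestAtMost singles start (e0 - 1) else cut0
    if cut ≠ -1 ∧ start + 800 < cut then cut else e0
  else e0

-- B's while loop, building the span list (same fuel discipline as A's loop)
def splitLoopB (n max_len : Int) (doubles singles : List Int)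
    (spans : List (Int × Int)) (start : Int) : Nat → List (Int × Int)
  | 0 => spans
  | fuel + 1 =>
    if start < n then
      let e := chunkEndB n max_len doubles singles start
      splitLoopB n max_len doubles singles (spans ++ [(start, e)]) e fuel
    else spans

def split_masked_alt (masked : String) (max_len : Int) : List String :=
  let cs := masked.toList
  let n := cs.length
  if (n : Int) ≤ max_len then [masked]
  else
    let spans := splitLoopB (n : Int) max_len (doublesOf cs) (singlesOf cs) [] 0 (n + 1)
    spans.map (fun p => PySem.Str.slice masked (some p.1) (some p.2))

-- ===== PRECONDITION & SPEC =====
-- Pre_ excludes only max_len ≤ 0 with nonempty masked: there A's while loop makes no progress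
-- (start never reaches len(masked)), i.e. the Python A diverges; A returns on all other inputs.
def Pre_split_masked (masked : String) (max_len : Int) : Prop := 1 ≤ max_len ∨ masked = ""
instance (masked : String) (max_len : Int) : Decidable (Pre_split_masked masked max_len) := by
  unfold Pre_split_masked; infer_instance

def pvWitness_split_masked : String × Int := ("hello", 3)

def Spec_split_masked (masked : String) (max_len : Int) (out : List String) : Prop := out = split_masked_alt masked max_len
instance (masked : String) (max_len : Int) (out : List String) : Decidable (Spec_split_masked masked max_len out) := by unfold Spec_split_masked; infer_instance

-- ===== CLAIM (what is proved, stated in full; the proofs are below) =====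
def Claim_equal_split_masked : Prop := ∀ (masked : String) (max_len : Int), Dom_split_masked masked max_len → Pre_split_masked masked max_len → Spec_split_masked masked max_len (split_masked masked max_len)

-- ===== LEMMAS AND PROOFS =====

-- "r is the result of a bounded rightmost-match search": either -1 and no match position lies in
-- [lo, hi], or r is the greatest match position in [lo, hi].
def IsCut (P : Nat → Prop) (lo hi r : Int) : Prop :=
  (r = -1 ∧ ∀ i : Nat, lo ≤ (i : Int) → (i : Int) ≤ hi → ¬ P i) ∨
  (∃ j : Nat, r = (j : Int) ∧ lo ≤ (j : Int) ∧ (j : Int) ≤ hi ∧ P j ∧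
    ∀ i : Nat, (j : Int) < (i : Int) → (i : Int) ≤ hi → ¬ P i)

lemma IsCut_unique {P : Nat → Prop} {lo hi r r' : Int}
    (h : IsCut P lo hi r) (h' : IsCut P lo hi r') : r = r' := by
  rcases h with ⟨rfl, hnone⟩ | ⟨j, rfl, hlo, hhi, hP, hmax⟩
  · rcases h' with ⟨rfl, _⟩ | ⟨j, rfl, hlo, hhi, hP, _⟩
    · rfl
    · exact absurd hP (hnone j hlo hhi)
  · rcases h' with ⟨rfl, hnone'⟩ | ⟨j', rfl, hlo', hhi', hP', hmax'⟩
    · exact absurd hP (hnone' j hlo hhi)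
    · rcases lt_trichotomy (j : Int) (j' : Int) with hlt | heq | hgt
      · exact absurd hP' (hmax j' hlt hhi')
      · exact heq
      · exact absurd hP (hmax' j hgt hhi)

-- characterization of PySem.Chars.rfind.go (backward scan): -1 and no match up to k, or the
-- greatest match position up to k
lemma rfind_go_isCut (t sub : List Char) (k : Nat) :
    (PySem.Chars.rfind.go t sub k = -1 ∧ ∀ j ≤ k, ¬ sub.isPrefixOf (t.drop j) = true) ∨
    (∃ j ≤ k, PySem.Chars.rfind.go t sub k = (j : Int) ∧ sub.isPrefixOf (t.drop j) = true ∧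
      ∀ i, j < i → i ≤ k → ¬ sub.isPrefixOf (t.drop i) = true) := by
  induction k with
  | zero =>
    by_cases h : sub.isPrefixOf t = true
    · right; exact ⟨0, le_refl 0, by simp [PySem.Chars.rfind.go, h], by simpa using h, by omega⟩
    · left
      constructor
      · simp [PySem.Chars.rfind.go, h]
      · intro j hj; interval_cases j; simpa using h
  | succ k ih =>
    by_cases h : sub.isPrefixOf (t.drop (k+1)) = true
    · right
      refine ⟨k+1, le_refl _, ?_, h, by omega⟩
      rw [PySem.Chars.rfind.go]; simp [h]
    · have heq : PySem.Chars.rfind.go t sub (k+1) = PySem.Chars.rfind.go t sub k := by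
        rw [PySem.Chars.rfind.go]; simp [h]
      rcases ih with ⟨h1, h2⟩ | ⟨j, hj, h1, h2, h3⟩
      · left
        refine ⟨heq.trans h1, fun j hj => ?_⟩
        rcases Nat.lt_or_ge j (k+1) with hl | hl
        · exact h2 j (by omega)
        · have : j = k+1 := by omega
          subst this; exact h
      · right
        refine ⟨j, by omega, heq.trans h1, h2, fun i hi1 hi2 => ?_⟩
        rcases Nat.lt_or_ge i (k+1) with hl | hl
        · exact h3 i hi1 (by omega)
        · have : i = k+1 := by omega
          subst this; exact h

-- A's rfind(sub, st, en) is the greatest match position in [st, en - |sub|]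
lemma rfindFrom_isCut (cs sub : List Char) (st en : Nat) (hen : en ≤ cs.length) (hsub : sub ≠ []) :
    IsCut (fun i => sub.isPrefixOf (cs.drop i) = true) (st : Int) ((en : Int) - (sub.length : Int))
      (PySem.Chars.rfindFrom cs sub (st : Int) (some (en : Int))) := by
  have hl1 : 1 ≤ sub.length := List.length_pos_iff.mpr hsub
  by_cases hse : (en : Int) < (st : Int)
  · have hres : PySem.Chars.rfindFrom cs sub (st : Int) (some (en : Int)) = -1 := by
      simp only [PySem.Chars.rfindFrom]
      have h1 : ¬ ((cs.length : Int) < (en : Int)) := by exact_mod_cast not_lt.mpr hen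
      have h2 : ¬ ((en : Int) < 0) := by omega
      have h3 : ¬ ((st : Int) < 0) := by omega
      simp [h1, h2, h3, hse]
    left
    refine ⟨hres, fun i hi1 hi2 => ?_⟩
    exfalso
    have : (sub.length : Int) ≥ 1 := by exact_mod_cast hl1
    omega
  · set t := (cs.take en).drop st with ht
    have hst : st ≤ en := by exact_mod_cast not_lt.mp hse
    have htlen : t.length = en - st := by
      simp [ht, List.length_drop, List.length_take, Nat.min_eq_left hen]
    have htrans : ∀ j : Nat, (sub.isPrefixOf (t.drop j) = true ↔
        sub.isPrefixOf (cs.drop (st + j)) = true ∧ st + j + sub.length ≤ en) := by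
      intro j
      have : t.drop j = (cs.drop (st + j)).take (en - (st + j)) := by
        rw [ht, List.drop_drop, List.drop_take]
      rw [this, List.isPrefixOf_iff_prefix, List.prefix_take_iff, List.isPrefixOf_iff_prefix]
      constructor
      · rintro ⟨h1, h2⟩; exact ⟨h1, by omega⟩
      · rintro ⟨h1, h2⟩; exact ⟨h1, by omega⟩
    have hres : PySem.Chars.rfindFrom cs sub (st : Int) (some (en : Int)) =
        (if PySem.Chars.rfind.go t sub t.length = -1 then -1
         else (st : Int) + PySem.Chars.rfind.go t sub t.length) := by
      simp only [PySem.Chars.rfindFrom, PySem.Chars.rfind]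
      have h1 : ¬ ((cs.length : Int) < (en : Int)) := by exact_mod_cast not_lt.mpr hen
      have h2 : ¬ ((en : Int) < 0) := by omega
      have h3 : ¬ ((st : Int) < 0) := by omega
      simp [h1, h2, h3, hse, ht]
    rcases rfind_go_isCut t sub t.length with ⟨h1, h2⟩ | ⟨j, hj, h1, h2, h3⟩
    · left
      refine ⟨by simp [hres, h1], fun i hi1 hi2 => ?_⟩
      intro hP
      have hii : st ≤ i := by exact_mod_cast hi1
      have hib : i + sub.length ≤ en := by
        have : (sub.length : Int) ≥ 1 := by exact_mod_cast hl1
        omega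
      refine h2 (i - st) (by omega) ?_
      rw [htrans]
      constructor
      · have : st + (i - st) = i := by omega
        rw [this]; exact hP
      · omega
    · right
      rw [htrans] at h2
      refine ⟨st + j, ?_, by push_cast; omega, ?_, h2.1, ?_⟩
      · rw [hres, if_neg (by rw [h1]; omega), h1]; push_cast; ring
      · have := h2.2; push_cast; omega
      · intro i hi1 hi2 hP
        have hgt : st + j < i := by exact_mod_cast hi1
        have hib : i + sub.length ≤ en := by
          have : (sub.length : Int) ≥ 1 := by exact_mod_cast hl1
          omega
        refine h3 (i - st) (by omega) (by omega) ?_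
        rw [htrans]
        exact ⟨by rw [show st + (i - st) = i by omega]; exact hP, by omega⟩

-- B's bestAtMost on a sorted list of exactly the match positions is the same greatest match position
lemma bestAtMost_isCut (P : Nat → Prop) (L : List Int) (lo hi : Int)
    (hsorted : L.Pairwise (· < ·))
    (hmem : ∀ i : Nat, ((i : Int) ∈ L ↔ P i))
    (hcast : ∀ x ∈ L, ∃ i : Nat, x = (i : Int)) :
    IsCut P lo hi (bestAtMost L lo hi) := by
  obtain ⟨hle, hbelow, habove⟩ := PySem.List.bisectRight_spec L hi (hsorted.imp le_of_lt)
  have hmono : ∀ (a b : Nat) (ha : a < L.length) (hb : b < L.length), a ≤ b → L[a] ≤ L[b] := by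
    intro a b ha hb hab
    rcases Nat.lt_or_ge a b with h | h
    · exact le_of_lt ((List.pairwise_iff_getElem.mp hsorted) a b ha hb h)
    · have : a = b := by omega
      subst this; rfl
  set j := PySem.List.bisectRight L hi with hjdef
  by_cases hj : 0 < j
  · have hjl : j - 1 < L.length := by omega
    have hgetD : L.getD (j - 1) (-1) = L[j-1] := List.getD_eq_getElem L (-1) hjl
    have hvle : L[j-1] ≤ hi := hbelow (j-1) hjl (by omega)
    by_cases hlo : lo ≤ L[j-1]
    · obtain ⟨iv, hiv⟩ := hcast L[j-1] (List.getElem_mem hjl)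
      right
      refine ⟨iv, ?_, ?_, ?_, ?_, ?_⟩
      · show bestAtMost L lo hi = _
        simp only [bestAtMost, ← hjdef, if_pos hj, hgetD, if_pos hlo]
        exact hiv
      · rw [← hiv]; exact hlo
      · rw [← hiv]; exact hvle
      · exact (hmem iv).mp (hiv ▸ List.getElem_mem hjl)
      · intro i hi1 hi2 hP
        obtain ⟨idx, hidx, hLi⟩ := List.getElem_of_mem ((hmem i).mpr hP)
        rcases Nat.lt_or_ge idx j with h | h
        · have : L[idx] ≤ L[j-1] := hmono idx (j-1) hidx hjl (by omega)
          rw [hLi, hiv] at this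
          omega
        · have := habove idx hidx h
          rw [hLi] at this
          omega
    · left
      refine ⟨?_, fun i hi1 hi2 hP => ?_⟩
      · show bestAtMost L lo hi = -1
        simp only [bestAtMost, ← hjdef, if_pos hj, hgetD, if_neg hlo]
      · obtain ⟨idx, hidx, hLi⟩ := List.getElem_of_mem ((hmem i).mpr hP)
        rcases Nat.lt_or_ge idx j with h | h
        · have : L[idx] ≤ L[j-1] := hmono idx (j-1) hidx hjl (by omega)
          rw [hLi] at this
          omega
        · have := habove idx hidx h
          rw [hLi] at this
          omega
  · left
    refine ⟨?_, fun i hi1 hi2 hP => ?_⟩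
    · show bestAtMost L lo hi = -1
      simp only [bestAtMost, ← hjdef, if_neg hj]
    · obtain ⟨idx, hidx, hLi⟩ := List.getElem_of_mem ((hmem i).mpr hP)
      have := habove idx hidx (by omega)
      rw [hLi] at this
      omega

lemma two_prefix (a b : Char) (t : List Char) :
    ([a, b].isPrefixOf t = true) ↔ (t[0]? = some a ∧ t[1]? = some b) := by
  rw [List.isPrefixOf_iff_prefix]
  match t with
  | [] => simp
  | [x] => simp [List.cons_prefix_cons]
  | x :: y :: rest => simp [List.cons_prefix_cons, eq_comm]

lemma one_prefix (a : Char) (t : List Char) :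
    ([a].isPrefixOf t = true) ↔ (t[0]? = some a) := by
  rw [List.isPrefixOf_iff_prefix]
  match t with
  | [] => simp
  | x :: rest => simp [List.cons_prefix_cons, eq_comm]

lemma doublesOf_mem (cs : List Char) (i : Nat) :
    ((i : Int) ∈ doublesOf cs ↔ ['\n', '\n'].isPrefixOf (cs.drop i) = true) := by
  rw [two_prefix, doublesOf, List.mem_map]
  constructor
  · rintro ⟨x, hx, hx3⟩
    rw [List.mem_filter] at hx
    have : x = i := by exact_mod_cast hx3
    subst this
    have hx2 := hx.2
    simp only [Bool.and_eq_true, beq_iff_eq] at hx2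
    simp [List.getElem?_drop, hx2.1, hx2.2]
  · rintro ⟨h0, h1⟩
    rw [List.getElem?_drop] at h0 h1
    refine ⟨i, List.mem_filter.mpr ⟨List.mem_range.mpr ?_, ?_⟩, rfl⟩
    · have : i + 1 < cs.length := (List.getElem?_eq_some_iff.mp h1).1
      omega
    · simp only [Bool.and_eq_true, beq_iff_eq]
      exact ⟨by simpa using h0, by simpa using h1⟩

lemma singlesOf_mem (cs : List Char) (i : Nat) :
    ((i : Int) ∈ singlesOf cs ↔ ['\n'].isPrefixOf (cs.drop i) = true) := by
  rw [one_prefix, singlesOf, List.mem_map]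
  constructor
  · rintro ⟨x, hx, hx3⟩
    rw [List.mem_filter] at hx
    have : x = i := by exact_mod_cast hx3
    subst this
    have hx2 := hx.2
    simp only [beq_iff_eq] at hx2
    simp [List.getElem?_drop, hx2]
  · rintro h0
    rw [List.getElem?_drop] at h0
    refine ⟨i, List.mem_filter.mpr ⟨List.mem_range.mpr ?_, ?_⟩, rfl⟩
    · have := (List.getElem?_eq_some_iff.mp (by simpa using h0)).1
      omega
    · simp only [beq_iff_eq]
      simpa using h0

lemma filterRangeMap_sorted (m : Nat) (g : Nat → Bool) :
    (((List.range m).filter g).map (fun (i : Nat) => (i : Int))).Pairwise (· < ·) := by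
  rw [List.pairwise_map]
  refine (List.Pairwise.filter g List.pairwise_lt_range).imp ?_
  intro a b h
  exact_mod_cast h

lemma filterRangeMap_cast (m : Nat) (g : Nat → Bool) :
    ∀ x ∈ ((List.range m).filter g).map (fun (i : Nat) => (i : Int)), ∃ i : Nat, x = (i : Int) := by
  intro x hx
  obtain ⟨i, _, rfl⟩ := List.mem_map.mp hx
  exact ⟨i, rfl⟩

lemma doublesOf_sorted (cs : List Char) : (doublesOf cs).Pairwise (· < ·) :=
  filterRangeMap_sorted _ _

lemma singlesOf_sorted (cs : List Char) : (singlesOf cs).Pairwise (· < ·) :=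
  filterRangeMap_sorted _ _

-- the two cut computations agree
lemma chunkEnd_eq (cs : List Char) (max_len : Int) (hml : 1 ≤ max_len) (st : Nat) :
    chunkEndA cs (cs.length : Int) max_len (st : Int)
      = chunkEndB (cs.length : Int) max_len (doublesOf cs) (singlesOf cs) (st : Int) := by
  simp only [chunkEndA, chunkEndB]
  by_cases he0 : min ((st : Int) + max_len) (cs.length : Int) < (cs.length : Int)
  · simp only [if_pos he0]
    set e0 := min ((st : Int) + max_len) (cs.length : Int) with he0def
    have he0nn : 0 ≤ e0 := by
      rw [he0def]
      have : (0 : Int) ≤ (st : Int) + max_len := by omega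
      have : (0 : Int) ≤ (cs.length : Int) := by positivity
      omega
    obtain ⟨en, hen⟩ : ∃ en : Nat, e0 = (en : Int) := ⟨e0.toNat, (Int.toNat_of_nonneg he0nn).symm⟩
    have henle : en ≤ cs.length := by
      have : e0 ≤ (cs.length : Int) := min_le_right _ _
      rw [hen] at this
      exact_mod_cast this
    have hcut2 : PySem.Chars.rfindFrom cs ['\n', '\n'] (st : Int) (some e0)
        = bestAtMost (doublesOf cs) (st : Int) (e0 - 2) := by
      rw [hen]
      exact IsCut_unique
        (rfindFrom_isCut cs ['\n', '\n'] st en henle (by simp))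
        (bestAtMost_isCut _ _ _ _ (doublesOf_sorted cs) (doublesOf_mem cs)
          (fun x hx => filterRangeMap_cast _ _ x hx))
    have hcut1 : PySem.Chars.rfindFrom cs ['\n'] (st : Int) (some e0)
        = bestAtMost (singlesOf cs) (st : Int) (e0 - 1) := by
      rw [hen]
      exact IsCut_unique
        (rfindFrom_isCut cs ['\n'] st en henle (by simp))
        (bestAtMost_isCut _ _ _ _ (singlesOf_sorted cs) (singlesOf_mem cs)
          (fun x hx => filterRangeMap_cast _ _ x hx))
    rw [hcut2, hcut1]
  · simp only [if_neg he0]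

-- a non-(-1) bounded rfind result is a Nat position within the list
lemma cut_nat (cs sub : List Char) (st en : Nat) (hen : en ≤ cs.length) (hsub : sub ≠ [])
    (hne : PySem.Chars.rfindFrom cs sub (st : Int) (some (en : Int)) ≠ -1) :
    ∃ j : Nat, PySem.Chars.rfindFrom cs sub (st : Int) (some (en : Int)) = (j : Int)
      ∧ j ≤ cs.length := by
  rcases rfindFrom_isCut cs sub st en hen hsub with ⟨hr, _⟩ | ⟨j, hr, _, hj, _, _⟩
  · exact absurd hr hne
  · refine ⟨j, hr, ?_⟩
    have h2 : (en : Int) ≤ (cs.length : Int) := by exact_mod_cast hen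
    have h3 : (0 : Int) ≤ (sub.length : Int) := by positivity
    have : (j : Int) ≤ (cs.length : Int) := by omega
    exact_mod_cast this

-- the end of a chunk is again a valid Nat position
lemma chunkEndA_bound (cs : List Char) (max_len : Int) (hml : 1 ≤ max_len) (st : Nat)
    (_hst : st < cs.length) :
    ∃ st' : Nat, chunkEndA cs (cs.length : Int) max_len (st : Int) = (st' : Int)
      ∧ st' ≤ cs.length := by
  have hnn : (0 : Int) ≤ min ((st : Int) + max_len) (cs.length : Int) := by
    refine le_min (by omega) (by positivity)
  obtain ⟨en, hen, henle⟩ : ∃ en : Nat,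
      min ((st : Int) + max_len) (cs.length : Int) = (en : Int) ∧ en ≤ cs.length := by
    refine ⟨(min ((st : Int) + max_len) (cs.length : Int)).toNat,
      (Int.toNat_of_nonneg hnn).symm, ?_⟩
    have h2 : min ((st : Int) + max_len) (cs.length : Int) ≤ (cs.length : Int) :=
      min_le_right _ _
    omega
  simp only [chunkEndA, hen]
  by_cases he0 : (en : Int) < (cs.length : Int)
  · rw [if_pos he0]
    by_cases hbr : (if PySem.Chars.rfindFrom cs ['\n', '\n'] (st : Int) (some (en : Int)) = -1
        then PySem.Chars.rfindFrom cs ['\n'] (st : Int) (some (en : Int))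
        else PySem.Chars.rfindFrom cs ['\n', '\n'] (st : Int) (some (en : Int))) ≠ -1
        ∧ (st : Int) + 800 < (if PySem.Chars.rfindFrom cs ['\n', '\n'] (st : Int)
            (some (en : Int)) = -1
          then PySem.Chars.rfindFrom cs ['\n'] (st : Int) (some (en : Int))
          else PySem.Chars.rfindFrom cs ['\n', '\n'] (st : Int) (some (en : Int)))
    · rw [if_pos hbr]
      by_cases h0 : PySem.Chars.rfindFrom cs ['\n', '\n'] (st : Int) (some (en : Int)) = -1
      · rw [if_pos h0]
        rw [if_pos h0] at hbr
        obtain ⟨j, hj, hjl⟩ := cut_nat cs ['\n'] st en henle (by simp) hbr.1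
        exact ⟨j, hj, hjl⟩
      · rw [if_neg h0]
        obtain ⟨j, hj, hjl⟩ := cut_nat cs ['\n', '\n'] st en henle (by simp) h0
        exact ⟨j, hj, hjl⟩
    · rw [if_neg hbr]
      exact ⟨en, rfl, henle⟩
  · rw [if_neg he0]
    exact ⟨en, rfl, henle⟩

-- the two while loops agree step for step (same fuel), mapping B's spans through slicing
lemma loop_eq (masked : String) (max_len : Int) (hml : 1 ≤ max_len) :
    ∀ (fuel : Nat) (st : Nat) (_ : st ≤ masked.toList.length) (spans : List (Int × Int)),
    splitLoopA masked masked.toList (masked.toList.length : Int) max_len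
        (spans.map (fun p => PySem.Str.slice masked (some p.1) (some p.2))) (st : Int) fuel
      = (splitLoopB (masked.toList.length : Int) max_len (doublesOf masked.toList)
          (singlesOf masked.toList) spans (st : Int) fuel).map
          (fun p => PySem.Str.slice masked (some p.1) (some p.2)) := by
  intro fuel
  induction fuel with
  | zero => intro st hst spans; simp [splitLoopA, splitLoopB]
  | succ fuel ih =>
    intro st hst spans
    by_cases hlt : (st : Int) < (masked.toList.length : Int)
    · have hstl : st < masked.toList.length := by exact_mod_cast hlt
      rw [splitLoopA, splitLoopB, if_pos hlt, if_pos hlt]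
      simp only
      obtain ⟨st', hstA, hst'le⟩ := chunkEndA_bound masked.toList max_len hml st hstl
      have hstB : chunkEndB (masked.toList.length : Int) max_len (doublesOf masked.toList)
          (singlesOf masked.toList) (st : Int) = (st' : Int) := by
        rw [← chunkEnd_eq masked.toList max_len hml st]
        exact hstA
      rw [hstA, hstB]
      have := ih st' hst'le (spans ++ [((st : Int), (st' : Int))])
      simpa using this
    · rw [splitLoopA, splitLoopB, if_neg hlt, if_neg hlt]

-- ===== VERDICT (by name: the statement is the Claim_ definition above) =====
theorem split_masked_spec : Claim_equal_split_masked := by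
  intro masked max_len _ hpre
  unfold Spec_split_masked split_masked split_masked_alt
  simp only
  by_cases hle : (masked.toList.length : Int) ≤ max_len
  · rw [if_pos hle, if_pos hle]
  · rw [if_neg hle, if_neg hle]
    rcases hpre with hml | hempty
    · have := loop_eq masked max_len hml (masked.toList.length + 1) 0 (by omega) []
      simpa using this
    · subst hempty
      simp [splitLoopA, splitLoopB]
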